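-- pv_equiv track=rewrite | github.com/bartbal/python_algoritmen_opdrachten | week1/w1_o4_verjaardagenparadox.py | countMatchesInNestedList
-- ===== SOURCE A (Python) =====
-- def countMatchesInNestedList(random_numbers):
--     assert (type(random_numbers[0])) == list, "not a two dimensional list"
--
--     matches = 0
--
--     for numbers in random_numbers:
--         start = 1
--         for number in numbers:
--             for k in range(start, len(numbers)):
--                 if(number == numbers[k]):
--                     matches += 1
--                     break
--             start += 1
--     return matches
-- ===== SOURCE B (Python) =====
-- def countMatchesInNestedList(random_numbers):
--     assert (type(random_numbers[0])) == list, "not a two dimensional list"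
--     return sum(len(numbers) - len(set(numbers)) for numbers in random_numbers)
-- ===== Notes on version B (the rewrite author's own statement) =====
-- stated objective: faster
-- what changed: Replaces A's per-element scan-for-a-later-equal (three nested loops with break) by a single pass that, per sublist, computes len(numbers) - len(set(numbers)) -- the number of distinct values subtracted from the length equals the number of elements that have a later duplicate.
import Mathlib
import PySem

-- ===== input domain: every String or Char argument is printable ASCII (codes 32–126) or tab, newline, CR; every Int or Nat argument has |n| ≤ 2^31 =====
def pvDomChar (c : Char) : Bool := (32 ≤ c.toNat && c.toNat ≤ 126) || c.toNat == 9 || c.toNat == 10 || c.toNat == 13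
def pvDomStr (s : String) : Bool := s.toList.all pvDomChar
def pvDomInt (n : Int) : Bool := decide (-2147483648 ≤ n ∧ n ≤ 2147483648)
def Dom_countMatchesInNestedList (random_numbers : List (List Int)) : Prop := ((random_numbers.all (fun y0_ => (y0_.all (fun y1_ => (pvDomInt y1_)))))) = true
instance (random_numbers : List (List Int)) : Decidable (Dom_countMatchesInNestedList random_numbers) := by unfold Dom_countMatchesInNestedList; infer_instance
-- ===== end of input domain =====

-- B replaces A's quadratic per-element scan-for-a-later-equal by a linear per-sublist
-- len(numbers) - len(set(numbers)); equivalence of the RETURN value is proved on nonempty input.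

-- ===== PORT A =====
-- inner `for k in range(start, len(numbers)): if number == numbers[k]: matches += 1; break`
-- (the break makes it a first-hit scan; pyGetD's default is never used: k is always in range)
def pvScanA (numbers : List Int) (number : Int) : List Int → Bool
  | [] => false
  | k :: ks =>
    if number == PySem.List.pyGetD numbers k 0 then true else pvScanA numbers number ks

-- the `assert type(random_numbers[0]) == list` always holds on a List (List Int) once
-- random_numbers ≠ [] (Pre_); on [] Python raises IndexError, excluded by Pre_.
def countMatchesInNestedList (random_numbers : List (List Int)) : Int :=
  random_numbers.foldl
    (fun ms numbers =>
      (numbers.foldl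
        (fun st number =>
          (st.1 + (if pvScanA numbers number
                      (PySem.List.pyRange st.2 (numbers.length : Int) 1) then 1 else 0),
           st.2 + 1))
        (ms, (1 : Int))).1)
    0

-- ===== PORT B =====
def countMatchesInNestedList_alt (random_numbers : List (List Int)) : Int :=
  random_numbers.foldl
    (fun acc numbers =>
      acc + ((numbers.length : Int) - PySem.Set.len (PySem.Set.ofList numbers)))
    0

-- ===== PRECONDITION & SPEC =====
-- Pre_ excludes only the empty outer list, on which Python A (and B) raise IndexError at random_numbers[0].
def Pre_countMatchesInNestedList (random_numbers : List (List Int)) : Prop :=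
  random_numbers ≠ []
instance (random_numbers : List (List Int)) : Decidable (Pre_countMatchesInNestedList random_numbers) := by
  unfold Pre_countMatchesInNestedList; infer_instance

def pvWitness_countMatchesInNestedList : List (List Int) := [[1, 2, 1], [3, 3, 3]]

def Spec_countMatchesInNestedList (random_numbers : List (List Int)) (out : Int) : Prop :=
  out = countMatchesInNestedList_alt random_numbers
instance (random_numbers : List (List Int)) (out : Int) : Decidable (Spec_countMatchesInNestedList random_numbers out) := by
  unfold Spec_countMatchesInNestedList; infer_instance

-- ===== CLAIM (what is proved, stated in full; the proofs are below) =====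
def Claim_equal_countMatchesInNestedList : Prop :=
  ∀ (random_numbers : List (List Int)), Dom_countMatchesInNestedList random_numbers →
    Pre_countMatchesInNestedList random_numbers →
    Spec_countMatchesInNestedList random_numbers (countMatchesInNestedList random_numbers)

-- ===== LEMMAS AND PROOFS =====

-- number of elements having a later equal element
def pvG : List Int → Int
  | [] => 0
  | y :: t => (if y ∈ t then 1 else 0) + pvG t

lemma pvScanA_eq (numbers : List Int) (number : Int) (n : Nat) :
    pvScanA numbers number (PySem.List.pyRange (n : Int) (numbers.length : Int) 1)
      = decide (number ∈ numbers.drop n) := by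
  by_cases h : n < numbers.length
  · rw [PySem.List.pyRange_one_cons (by exact_mod_cast h)]
    have hidx : PySem.List.pyGetD numbers (n : Int) 0 = numbers[n] := by
      rw [PySem.List.pyGetD_natCast]
      simp [List.getD_eq_getElem?_getD, h]
    have hd : numbers.drop n = numbers[n] :: numbers.drop (n + 1) :=
      List.drop_eq_getElem_cons h
    have hmem : (number ∈ numbers.drop n) ↔ (number = numbers[n] ∨ number ∈ numbers.drop (n + 1)) := by
      rw [hd]; exact List.mem_cons
    have hc : ((n : Int) + 1) = ((n + 1 : Nat) : Int) := by push_cast; ring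
    rw [pvScanA, hidx, hc, pvScanA_eq numbers number (n + 1)]
    by_cases he : number = numbers[n]
    · have hin : numbers[n] ∈ numbers.drop n := by
        rw [hd]; exact List.mem_cons_self
      simp [he, hin]
    · simp [he, hmem]
  · rw [PySem.List.pyRange_one_eq_nil (by omega), pvScanA]
    simp [List.drop_eq_nil_of_le (by omega : numbers.length ≤ n)]
termination_by numbers.length - n

lemma pvInner_eq (numbers : List Int) :
    ∀ (ys : List Int) (n : Nat) (m : Int), numbers.drop n = ys →
    (ys.foldl
        (fun st number =>
          (st.1 + (if pvScanA numbers number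
                      (PySem.List.pyRange st.2 (numbers.length : Int) 1) then 1 else 0),
           st.2 + 1))
        (m, ((n : Int) + 1))).1 = m + pvG ys := by
  intro ys
  induction ys with
  | nil => intro n m _; simp [pvG]
  | cons y t ih =>
    intro n m hdrop
    have ht : numbers.drop (n + 1) = t := by
      rw [← List.tail_drop, hdrop]; rfl
    have hcast : ((n : Int) + 1) = ((n + 1 : Nat) : Int) := by push_cast; ring
    simp only [List.foldl_cons]
    rw [hcast, pvScanA_eq numbers y (n + 1), ht]
    rw [ih (n + 1) _ ht, pvG]
    by_cases hy : y ∈ t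
    · rw [if_pos (decide_eq_true hy), if_pos hy]; ring
    · rw [if_neg (fun hcon => hy (of_decide_eq_true hcon)), if_neg hy]; ring

lemma pvG_eq_sub_dedup (l : List Int) :
    pvG l = (l.length : Int) - (l.dedup.length : Int) := by
  induction l with
  | nil => simp [pvG]
  | cons y t ih =>
    by_cases hy : y ∈ t
    · rw [pvG, List.dedup_cons_of_mem hy, ih, if_pos hy]; simp only [List.length_cons]; push_cast; ring
    · rw [pvG, List.dedup_cons_of_notMem hy, ih, if_neg hy]; simp only [List.length_cons]; push_cast; ring

lemma pvSetLen_eq_dedup (l : List Int) :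
    PySem.Set.len (PySem.Set.ofList l) = (l.dedup.length : Int) := by
  have h1 : (PySem.Set.ofList l).toFinset = l.dedup.toFinset := by
    ext x
    simp [PySem.Set.mem_ofList]
  have h2 : (PySem.Set.ofList l).length = l.dedup.length := by
    rw [← List.toFinset_card_of_nodup (PySem.Set.nodup_ofList l),
        ← List.toFinset_card_of_nodup l.nodup_dedup, h1]
  simp [PySem.Set.len, h2]

lemma pvFold_eq (rn : List (List Int)) : ∀ (m : Int),
    rn.foldl
      (fun ms numbers =>
        (numbers.foldl
          (fun st number =>
            (st.1 + (if pvScanA numbers number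
                        (PySem.List.pyRange st.2 (numbers.length : Int) 1) then 1 else 0),
             st.2 + 1))
          (ms, (1 : Int))).1)
      m
    = rn.foldl
        (fun acc numbers =>
          acc + ((numbers.length : Int) - PySem.Set.len (PySem.Set.ofList numbers)))
        m := by
  induction rn with
  | nil => intro m; rfl
  | cons numbers rest ih =>
    intro m
    simp only [List.foldl_cons]
    have h0 : ((0 : Nat) : Int) + 1 = (1 : Int) := by norm_num
    have := pvInner_eq numbers numbers 0 m rfl
    rw [h0] at this
    rw [this, pvG_eq_sub_dedup, pvSetLen_eq_dedup, ih]

-- ===== VERDICT (by name: the statement is the Claim_ definition above) =====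
theorem countMatchesInNestedList_spec : Claim_equal_countMatchesInNestedList := by
  intro rn _ _
  unfold Spec_countMatchesInNestedList countMatchesInNestedList countMatchesInNestedList_alt
  exact pvFold_eq rn 0
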